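-- pv_equiv track=rewrite | github.com/mattsalo81/ml-stuff | nn/csv_reader.py | get_training_and_test_sets
-- ===== SOURCE A (Python) =====
-- def get_training_and_test_sets(x, y, one_in_x_test):
--     n = 0
--     train_x = []
--     train_y = []
--     test_x = []
--     test_y = []
--     for i in range(0, len(x)):
--         n += 1
--         if n == one_in_x_test:
--             n = 0
--             test_x.append(x[i])
--             test_y.append(y[i])
--         else:
--             train_x.append(x[i])
--             train_y.append(y[i])
--     return train_x, train_y, test_x, test_y
-- ===== SOURCE B (Python) =====
-- def get_training_and_test_sets(x, y, one_in_x_test):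
--     # Pair the two lists once, then consume the pair list in blocks of
--     # one_in_x_test: each full block sends its last pair to the test set and
--     # the rest to the training set; a final partial block (and the whole list
--     # when the period is non-positive) goes to training. Unzip at the end.
--     pairs = list(zip(x, y))
--     k = one_in_x_test
--     train, test = [], []
--     if k <= 0:
--         train = pairs
--     else:
--         while len(pairs) >= k:
--             chunk, pairs = pairs[:k], pairs[k:]
--             train += chunk[:-1]
--             test.append(chunk[-1])
--         train += pairs
--     return ([p for p, _ in train], [q for _, q in train],
--             [p for p, _ in test], [q for _, q in test])
-- ===== Notes on version B (the rewrite author's own statement) =====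
-- stated objective: alternative
-- what changed: B zips x and y into one pair list, consumes it in blocks of length one_in_x_test (last pair of each full block to test, the rest and the final partial block to train) and unzips at the end, instead of A's per-element loop with a running reset counter.
import Mathlib
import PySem

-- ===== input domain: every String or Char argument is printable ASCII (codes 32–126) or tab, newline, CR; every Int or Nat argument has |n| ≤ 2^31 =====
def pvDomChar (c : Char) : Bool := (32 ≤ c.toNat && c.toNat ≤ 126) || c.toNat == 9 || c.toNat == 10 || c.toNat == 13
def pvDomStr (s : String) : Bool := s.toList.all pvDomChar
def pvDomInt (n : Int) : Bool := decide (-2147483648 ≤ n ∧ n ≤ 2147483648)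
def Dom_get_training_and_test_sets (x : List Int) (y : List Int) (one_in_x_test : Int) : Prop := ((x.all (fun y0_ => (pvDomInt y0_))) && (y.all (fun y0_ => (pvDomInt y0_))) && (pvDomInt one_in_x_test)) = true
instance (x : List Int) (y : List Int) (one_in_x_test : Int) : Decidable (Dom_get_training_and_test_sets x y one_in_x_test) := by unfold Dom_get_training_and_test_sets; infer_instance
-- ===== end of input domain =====

-- B pairs x with y once, consumes the pair list in blocks of one_in_x_test (last pair of each full
-- block to test, the rest to train) and unzips at the end, instead of A's per-element counter loop;
-- objective: alternative, not faster. Where y is shorter than x, A raises IndexError (outside Pre_).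

-- ===== PORT A =====
-- loop body of A's for-loop: state = (n, train_x, train_y, test_x, test_y)
def stepA (x : List Int) (y : List Int) (one_in_x_test : Int)
    (s : Int × List Int × List Int × List Int × List Int) (i : Nat) :
    Int × List Int × List Int × List Int × List Int :=
  let n := s.1 + 1
  if n = one_in_x_test then
    (0, s.2.1, s.2.2.1, s.2.2.2.1 ++ [x.getD i 0], s.2.2.2.2 ++ [y.getD i 0])
  else
    (n, s.2.1 ++ [x.getD i 0], s.2.2.1 ++ [y.getD i 0], s.2.2.2.1, s.2.2.2.2)

def get_training_and_test_sets (x : List Int) (y : List Int) (one_in_x_test : Int) : List Int × List Int × List Int × List Int :=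
  let r := (List.range x.length).foldl (stepA x y one_in_x_test) (0, [], [], [], [])
  (r.2.1, r.2.2.1, r.2.2.2.1, r.2.2.2.2)

-- ===== PORT B =====
-- B's while-loop: chunk off the first kn pairs while at least kn remain
-- (the '1 ≤ kn' conjunct only makes the recursion total; B calls it with kn ≥ 1)
def pvChunkLoop (kn : Nat) (pairs train test : List (Int × Int)) : List (Int × Int) × List (Int × Int) :=
  if h : 1 ≤ kn ∧ kn ≤ pairs.length then
    let chunk := PySem.List.slice pairs none (some (kn : Int))
    pvChunkLoop kn (PySem.List.slice pairs (some (kn : Int)) none)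
      (train ++ PySem.List.slice chunk none (some (-1)))
      (test ++ [PySem.List.pyGetD chunk (-1) (0, 0)])
  else (train ++ pairs, test)
termination_by pairs.length
decreasing_by simp [PySem.List.slice_from_natCast]; omega

def get_training_and_test_sets_alt (x : List Int) (y : List Int) (one_in_x_test : Int) : List Int × List Int × List Int × List Int :=
  let pairs := x.zip y
  if one_in_x_test ≤ 0 then
    (pairs.map Prod.fst, pairs.map Prod.snd, [], [])
  else
    let r := pvChunkLoop one_in_x_test.toNat pairs [] []
    (r.1.map Prod.fst, r.1.map Prod.snd, r.2.map Prod.fst, r.2.map Prod.snd)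

-- ===== PRECONDITION & SPEC =====
-- Pre_ excludes exactly the inputs where A raises IndexError: y shorter than x (A reads y[i] for every i < len(x)).
def Pre_get_training_and_test_sets (x : List Int) (y : List Int) (one_in_x_test : Int) : Prop :=
  x.length ≤ y.length
instance (x : List Int) (y : List Int) (one_in_x_test : Int) : Decidable (Pre_get_training_and_test_sets x y one_in_x_test) := by unfold Pre_get_training_and_test_sets; infer_instance
def pvWitness_get_training_and_test_sets : List Int × List Int × Int := ([1, 2, 3], [4, 5, 6], 2)

def Spec_get_training_and_test_sets (x : List Int) (y : List Int) (one_in_x_test : Int) (out : List Int × List Int × List Int × List Int) : Prop := out = get_training_and_test_sets_alt x y one_in_x_test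
instance (x : List Int) (y : List Int) (one_in_x_test : Int) (out : List Int × List Int × List Int × List Int) : Decidable (Spec_get_training_and_test_sets x y one_in_x_test out) := by unfold Spec_get_training_and_test_sets; infer_instance

-- ===== CLAIM (what is proved, stated in full; the proofs are below) =====
def Claim_equal_get_training_and_test_sets : Prop := ∀ (x : List Int) (y : List Int) (one_in_x_test : Int), Dom_get_training_and_test_sets x y one_in_x_test → Pre_get_training_and_test_sets x y one_in_x_test → Spec_get_training_and_test_sets x y one_in_x_test (get_training_and_test_sets x y one_in_x_test)

-- ===== LEMMAS AND PROOFS =====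

theorem pv_map_range'_getD {α : Type} (L : List α) (d : α) :
    ∀ (m j : Nat), j + m ≤ L.length →
      (List.range' j m).map (fun i => L.getD i d) = (L.drop j).take m := by
  intro m
  induction m with
  | zero => intro j h; simp
  | succ m ih =>
      intro j h
      rw [List.range'_succ, List.map_cons, ih (j+1) (by omega)]
      have hj : j < L.length := by omega
      rw [List.getD_eq_getElem L d hj, List.drop_eq_getElem_cons hj, List.take_succ_cons]

theorem pv_zip_fst (x y : List Int) (hy : x.length ≤ y.length) (j m : Nat) (h : j + m ≤ x.length) :
    (((x.zip y).drop j).take m).map Prod.fst = (List.range' j m).map (fun i => x.getD i 0) := by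
  rw [pv_map_range'_getD x 0 m j h]
  apply List.ext_getElem
  · simp; omega
  · intro i h1 h2; simp

theorem pv_zip_snd (x y : List Int) (hy : x.length ≤ y.length) (j m : Nat) (h : j + m ≤ x.length) :
    (((x.zip y).drop j).take m).map Prod.snd = (List.range' j m).map (fun i => y.getD i 0) := by
  rw [pv_map_range'_getD y 0 m j (by omega)]
  apply List.ext_getElem
  · simp; omega
  · intro i h1 h2; simp

theorem pv_run_train (x y : List Int) (k : Int) :
    ∀ (t j : Nat) (c : Int) (tx ty sx sy : List Int), 0 ≤ c → c + t < k →
      (List.range' j t).foldl (stepA x y k) (c, tx, ty, sx, sy)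
        = (c + t,
           tx ++ (List.range' j t).map (fun i => x.getD i 0),
           ty ++ (List.range' j t).map (fun i => y.getD i 0),
           sx, sy) := by
  intro t
  induction t with
  | zero => intro j c tx ty sx sy hc ht; simp
  | succ m ih =>
      intro j c tx ty sx sy hc ht
      rw [List.range'_succ, List.foldl_cons]
      have hne : ¬ (c + 1 = k) := by omega
      simp only [stepA, hne, if_false]
      rw [ih (j + 1) (c + 1) _ _ _ _ (by omega) (by push_cast at ht ⊢; omega)]
      simp [List.append_assoc]
      omega

theorem pv_dropLast_take (l : List (Int × Int)) (k : Nat) (hlen : k ≤ l.length) :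
    (l.take k).dropLast = l.take (k-1) := by
  rw [List.dropLast_eq_take, List.take_take, List.length_take]
  congr 1; omega

theorem pv_take_getLast (l : List (Int × Int)) (k : Nat) (hk : 1 ≤ k) (hlen : k ≤ l.length)
    (h : l.take k ≠ []) : (l.take k).getLast h = l[k-1]'(by omega) := by
  rw [List.getLast_eq_getElem, List.getElem_take]
  congr 1
  simp; omega

theorem pv_main_pos (x y : List Int) (hy : x.length ≤ y.length) (kn : Nat) (hk : 1 ≤ kn) :
    ∀ (m j : Nat), j + m = x.length → ∀ (tx ty sx sy : List Int) (tp sp : List (Int × Int)),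
      ((List.range' j m).foldl (stepA x y (kn : Int))
          (0, tx ++ tp.map Prod.fst, ty ++ tp.map Prod.snd, sx ++ sp.map Prod.fst, sy ++ sp.map Prod.snd)).2
        = (tx ++ (pvChunkLoop kn ((x.zip y).drop j) tp sp).1.map Prod.fst,
           ty ++ (pvChunkLoop kn ((x.zip y).drop j) tp sp).1.map Prod.snd,
           sx ++ (pvChunkLoop kn ((x.zip y).drop j) tp sp).2.map Prod.fst,
           sy ++ (pvChunkLoop kn ((x.zip y).drop j) tp sp).2.map Prod.snd) := by
  intro m
  induction m using Nat.strong_induction_on with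
  | _ m ih =>
    intro j hj tx ty sx sy tp sp
    have hzlen : ((x.zip y).drop j).length = m := by
      simp [List.length_zip]; omega
    by_cases hcase : m < kn
    · -- final partial block: everything remaining goes to train
      rw [pvChunkLoop, dif_neg (by omega)]
      rw [pv_run_train x y (kn : Int) m j 0 _ _ _ _ le_rfl (by push_cast; omega)]
      have hfst := pv_zip_fst x y hy j m (by omega)
      have hsnd := pv_zip_snd x y hy j m (by omega)
      rw [List.take_of_length_le (le_of_eq hzlen)] at hfst hsnd
      rw [← hfst, ← hsnd]
      simp [List.append_assoc]
    · -- full block of kn, then recurse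
      push_neg at hcase
      have hsplit : List.range' j m
          = List.range' j (kn-1) ++ (j+(kn-1)) :: List.range' (j+kn) (m-kn) := by
        have h1 := @List.range'_append j (kn-1) (1+(m-kn)) 1
        simp only [Nat.one_mul] at h1
        rw [show (kn-1) + (1+(m-kn)) = m by omega] at h1
        rw [← h1, show 1+(m-kn) = (m-kn)+1 by omega, List.range'_succ,
          show j+(kn-1)+1 = j+kn by omega]
      rw [hsplit, List.foldl_append, List.foldl_cons]
      rw [pv_run_train x y (kn : Int) (kn-1) j 0 _ _ _ _ le_rfl (by push_cast; omega)]
      have hcond : (0:Int) + ((kn-1 : Nat) : Int) + 1 = (kn : Int) := by push_cast; omega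
      simp only [stepA, hcond, if_pos]
      -- identify the appended pieces with B's chunk pieces
      have hfst := pv_zip_fst x y hy j (kn-1) (by omega)
      have hsnd := pv_zip_snd x y hy j (kn-1) (by omega)
      have hne : ((x.zip y).drop j).take kn ≠ [] := by
        apply List.ne_nil_of_length_pos
        simp [List.length_take]; omega
      have hlast : PySem.List.pyGetD (((x.zip y).drop j).take kn) (-1) ((0:Int), (0:Int))
          = (x.getD (j+(kn-1)) 0, y.getD (j+(kn-1)) 0) := by
        rw [PySem.List.pyGetD_neg_one _ _ hne, pv_take_getLast _ kn hk (by omega) hne]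
        have hjk : j + (kn-1) < x.length := by omega
        rw [List.getElem_drop, List.getElem_zip,
          List.getD_eq_getElem x 0 hjk, List.getD_eq_getElem y 0 (by omega)]
      have ihs := ih (m-kn) (by omega) (j+kn) (by omega) tx ty sx sy
        (tp ++ ((x.zip y).drop j).take (kn-1)) (sp ++ [((x.getD (j+(kn-1)) 0, y.getD (j+(kn-1)) 0) : Int × Int)])
      simp only [List.map_append, List.map_cons, List.map_nil] at ihs
      rw [hfst, hsnd] at ihs
      simp only [← List.append_assoc] at ihs ⊢
      rw [ihs]
      -- right side: unfold one step of the chunk loop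
      conv_rhs => rw [pvChunkLoop]
      rw [dif_pos ⟨hk, by omega⟩]
      have hdl : ((List.drop j (x.zip y)).take kn).dropLast = (List.drop j (x.zip y)).take (kn-1) :=
        pv_dropLast_take _ kn (by omega)
      simp only [PySem.List.slice_to_natCast, PySem.List.slice_from_natCast,
        PySem.List.slice_to_neg_one, List.drop_drop, hdl, hlast]

-- A's loop with a non-positive period puts everything in train
theorem pv_loopA_nonpos (x y : List Int) (k : Int) (hk : k ≤ 0) :
    ∀ (m j : Nat) (c : Int) (tx ty sx sy : List Int), 0 ≤ c →
      (List.range' j m).foldl (stepA x y k) (c, tx, ty, sx, sy)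
        = (c + m,
           tx ++ (List.range' j m).map (fun i => x.getD i 0),
           ty ++ (List.range' j m).map (fun i => y.getD i 0),
           sx, sy) := by
  intro m
  induction m with
  | zero => intro j c tx ty sx sy hc; simp
  | succ m ih =>
      intro j c tx ty sx sy hc
      rw [List.range'_succ, List.foldl_cons]
      have hne : ¬ (c + 1 = k) := by omega
      simp only [stepA, hne, if_false]
      rw [ih (j + 1) (c + 1) _ _ _ _ (by omega)]
      simp [List.append_assoc]
      omega

-- ===== VERDICT (by name: the statement is the Claim_ definition above) =====
theorem get_training_and_test_sets_spec : Claim_equal_get_training_and_test_sets := by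
  intro x y k _ hpre
  unfold Pre_get_training_and_test_sets at hpre
  unfold Spec_get_training_and_test_sets
  simp only [get_training_and_test_sets, get_training_and_test_sets_alt]
  have hfst := pv_zip_fst x y hpre 0 x.length (by omega)
  have hsnd := pv_zip_snd x y hpre 0 x.length (by omega)
  rw [List.drop_zero, List.take_of_length_le (by simp [hpre])] at hfst hsnd
  by_cases hk : k ≤ 0
  · rw [if_pos hk, List.range_eq_range',
      pv_loopA_nonpos x y k hk x.length 0 0 [] [] [] [] le_rfl]
    simp [hfst, hsnd]
  · rw [if_neg hk]
    have hk1 : 1 ≤ k.toNat := by omega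
    have hkc : ((k.toNat : Nat) : Int) = k := by omega
    have hmain := pv_main_pos x y hpre k.toNat hk1 x.length 0 (by omega) [] [] [] [] [] []
    simp only [List.map_nil, List.nil_append, List.drop_zero] at hmain
    rw [List.range_eq_range', ← hkc, hmain]
    simp only [Int.toNat_natCast]
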